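-- pv_equiv track=rewrite | github.com/FinOCE/CP1404 | assessment_01/assignment1.py | sort_by_visited
-- ===== SOURCE A (Python) =====
-- def sort_by_visited(lines):
--     """ sort the visited and not visited locations by priority, then combine and set as variable lines """
--     lines_visited = []
--     lines_not_visited = []
--     for line in lines:
--         if line[3] == "v":
--             lines_visited.append(line)
--         else:
--             lines_not_visited.append(line)
--     lines_visited.sort(key=sort_by_priority)
--     lines_not_visited.sort(key=sort_by_priority)
--     lines = lines_not_visited + lines_visited
--     return lines
--
-- def sort_by_priority(line):
--     """ used in sort functions above to sort by priority """
--     return line[2]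
-- ===== SOURCE B (Python) =====
-- def sort_by_visited(lines):
--     """ sort the visited and not visited locations by priority, then combine and set as variable lines """
--     return sorted(lines, key=lambda line: (line[3] == "v", line[2]))
-- ===== Notes on version B (the rewrite author's own statement) =====
-- stated objective: simpler
-- what changed: Replaces the two-list partition plus two separate sorts and concatenation with a single stable sort using a composite (visited-flag, priority) key.
import Mathlib
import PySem

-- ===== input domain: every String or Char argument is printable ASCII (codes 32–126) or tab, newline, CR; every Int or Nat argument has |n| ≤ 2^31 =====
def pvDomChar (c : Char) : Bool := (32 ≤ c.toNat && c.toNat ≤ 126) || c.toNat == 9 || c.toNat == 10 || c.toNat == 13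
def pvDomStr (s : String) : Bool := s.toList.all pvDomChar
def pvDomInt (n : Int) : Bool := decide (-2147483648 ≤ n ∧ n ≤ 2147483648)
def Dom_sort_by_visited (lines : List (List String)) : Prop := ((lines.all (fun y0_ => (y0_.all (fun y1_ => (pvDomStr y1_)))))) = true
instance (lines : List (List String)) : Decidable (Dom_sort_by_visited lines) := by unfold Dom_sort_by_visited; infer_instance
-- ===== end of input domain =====

-- B replaces A's partition + two sorts + concatenation by ONE stable sort with a
-- composite (visited-flag, priority) key; objective: simpler. Return values only
-- are compared (A does not mutate its argument).

-- ===== PORT A =====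
-- helper sort_by_priority: return line[2]
def sort_by_priority (line : List String) : String := PySem.List.pyGetD line 2 ""

def sort_by_visited (lines : List (List String)) : List (List String) :=
  -- partition loop over lines, accumulating (lines_visited, lines_not_visited)
  let p := lines.foldl
    (fun (acc : List (List String) × List (List String)) line =>
      if PySem.List.pyGetD line 3 "" == "v" then (acc.1 ++ [line], acc.2)
      else (acc.1, acc.2 ++ [line]))
    ([], [])
  let lines_visited := PySem.List.sorted p.1 sort_by_priority
  let lines_not_visited := PySem.List.sorted p.2 sort_by_priority
  lines_not_visited ++ lines_visited

-- ===== PORT B =====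
def sort_by_visited_alt (lines : List (List String)) : List (List String) :=
  PySem.List.sorted2 lines
    (fun line => PySem.List.pyGetD line 3 "" == "v")
    (fun line => PySem.List.pyGetD line 2 "")

-- ===== PRECONDITION & SPEC =====
-- A indexes line[3] and line[2]: lines shorter than 4 make Python raise IndexError.
def Pre_sort_by_visited (lines : List (List String)) : Prop :=
  ∀ l ∈ lines, 4 ≤ l.length
instance (lines : List (List String)) : Decidable (Pre_sort_by_visited lines) := by
  unfold Pre_sort_by_visited; infer_instance

def pvWitness_sort_by_visited : List (List String) :=
  [["a", "b", "2", "v"], ["c", "d", "1", "n"], ["e", "f", "1", "v"]]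

def Spec_sort_by_visited (lines : List (List String)) (out : List (List String)) : Prop :=
  out = sort_by_visited_alt lines
instance (lines : List (List String)) (out : List (List String)) : Decidable (Spec_sort_by_visited lines out) := by
  unfold Spec_sort_by_visited; infer_instance

-- ===== CLAIM (what is proved, stated in full; the proofs are below) =====
def Claim_equal_sort_by_visited : Prop :=
  ∀ (lines : List (List String)), Dom_sort_by_visited lines → Pre_sort_by_visited lines →
    Spec_sort_by_visited lines (sort_by_visited lines)

-- ===== LEMMAS AND PROOFS =====

-- abbreviations for the two key projections (proof-side only)
def pvVis (line : List String) : Bool := PySem.List.pyGetD line 3 "" == "v"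
def pvKey (line : List String) : String := PySem.List.pyGetD line 2 ""

-- the lexicographic 'before' test of sorted2 at these keys
def pvLex (a b : List String) : Bool :=
  decide (pvVis a < pvVis b) || (!decide (pvVis b < pvVis a) && decide (pvKey a < pvKey b))

lemma insertBy_congr (b1 b2 : List String → List String → Bool) (x : List String)
    (ys : List (List String)) (h : ∀ y ∈ ys, b1 x y = b2 x y) :
    PySem.List.insertBy b1 x ys = PySem.List.insertBy b2 x ys := by
  induction ys with
  | nil => rfl
  | cons y ys ih =>
    simp only [PySem.List.insertBy]
    rw [h y (by simp)]
    split
    · rfl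
    · rw [ih (fun z hz => h z (by simp [hz]))]

lemma insertBy_append_right (b : List String → List String → Bool) (x : List String)
    (s₁ s₂ : List (List String)) (h : ∀ y ∈ s₁, b x y = false) :
    PySem.List.insertBy b x (s₁ ++ s₂) = s₁ ++ PySem.List.insertBy b x s₂ := by
  induction s₁ with
  | nil => rfl
  | cons y ys ih =>
    simp only [List.cons_append, PySem.List.insertBy]
    rw [h y (by simp), if_neg (by simp), ih (fun z hz => h z (by simp [hz]))]

lemma insertBy_append_split (lex b : List String → List String → Bool) (x : List String)
    (s₁ s₂ : List (List String)) (h1 : ∀ y ∈ s₁, lex x y = b x y)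
    (h2 : ∀ y ∈ s₂, lex x y = true) :
    PySem.List.insertBy lex x (s₁ ++ s₂) = PySem.List.insertBy b x s₁ ++ s₂ := by
  induction s₁ with
  | nil =>
    cases s₂ with
    | nil => rfl
    | cons z zs => simp [PySem.List.insertBy, h2 z (by simp)]
  | cons y ys ih =>
    simp only [List.cons_append, PySem.List.insertBy, h1 y (by simp)]
    split
    · rfl
    · rw [ih (fun z hz => h1 z (by simp [hz]))]
      simp

lemma pvLex_of_true_false (x y : List String) (hx : pvVis x = true) (hy : pvVis y = false) :
    pvLex x y = false := by simp [pvLex, hx, hy]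

lemma pvLex_of_false_true (x y : List String) (hx : pvVis x = false) (hy : pvVis y = true) :
    pvLex x y = true := by simp [pvLex, hx, hy]

lemma pvLex_of_same (x y : List String) (h : pvVis x = pvVis y) :
    pvLex x y = decide (pvKey x < pvKey y) := by
  simp [pvLex, h]

-- the heart: the single stable sort with the composite key equals
-- sort(not-visited) ++ sort(visited)
lemma sorted2_eq_split (lines : List (List String)) :
    PySem.List.sorted2 lines pvVis pvKey =
      PySem.List.sorted (lines.filter (fun l => !pvVis l)) pvKey ++
      PySem.List.sorted (lines.filter pvVis) pvKey := by
  induction lines using List.reverseRecOn with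
  | nil => rfl
  | append_singleton xs x ih =>
    have e1 : PySem.List.sorted2 (xs ++ [x]) pvVis pvKey =
        PySem.List.insertBy pvLex x (PySem.List.sorted2 xs pvVis pvKey) := by
      simp only [PySem.List.sorted2, List.foldl_append, List.foldl_cons, List.foldl_nil]
      simp only [Bool.false_eq_true, if_false]
      rfl
    have e2 : ∀ l : List (List String), PySem.List.sorted (l ++ [x]) pvKey =
        PySem.List.insertBy (fun a b => decide (pvKey a < pvKey b)) x
          (PySem.List.sorted l pvKey) := by
      intro l
      simp only [PySem.List.sorted, List.foldl_append, List.foldl_cons, List.foldl_nil]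
      simp only [Bool.false_eq_true, if_false]
    have hmem_nv : ∀ y ∈ PySem.List.sorted (xs.filter (fun l => !pvVis l)) pvKey, pvVis y = false := by
      intro y hy
      have := (PySem.List.mem_sorted (xs := xs.filter (fun l => !pvVis l))
        (key := pvKey) (rev := false) (x := y)).1 hy
      simpa using (List.of_mem_filter this)
    have hmem_v : ∀ y ∈ PySem.List.sorted (xs.filter pvVis) pvKey, pvVis y = true := by
      intro y hy
      have := (PySem.List.mem_sorted (xs := xs.filter pvVis)
        (key := pvKey) (rev := false) (x := y)).1 hy
      simpa using (List.of_mem_filter this)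
    rw [e1, ih]
    by_cases hx : pvVis x = true
    · -- x is visited: lands in the right block
      have f1 : List.filter (fun l => !pvVis l) (xs ++ [x]) = List.filter (fun l => !pvVis l) xs := by
        simp [hx]
      have f2 : List.filter pvVis (xs ++ [x]) = List.filter pvVis xs ++ [x] := by
        simp [hx]
      rw [insertBy_append_right pvLex x _ _
        (fun y hy => pvLex_of_true_false x y hx (hmem_nv y hy))]
      rw [insertBy_congr pvLex (fun a b => decide (pvKey a < pvKey b)) x _
        (fun y hy => pvLex_of_same x y (by rw [hx, hmem_v y hy]))]
      rw [f1, f2, e2]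
    · -- x is not visited: lands in the left block
      have hx' : pvVis x = false := by simpa using hx
      have f1 : List.filter (fun l => !pvVis l) (xs ++ [x]) = List.filter (fun l => !pvVis l) xs ++ [x] := by
        simp [hx']
      have f2 : List.filter pvVis (xs ++ [x]) = List.filter pvVis xs := by
        simp [hx']
      rw [insertBy_append_split pvLex (fun a b => decide (pvKey a < pvKey b)) x _ _
        (fun y hy => pvLex_of_same x y (by rw [hx', hmem_nv y hy]))
        (fun y hy => pvLex_of_false_true x y hx' (hmem_v y hy))]
      rw [f1, f2, e2]

-- A's partition loop produces (filter visited, filter not-visited)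
lemma partition_foldl (lines : List (List String)) (a b : List (List String)) :
    lines.foldl
      (fun (acc : List (List String) × List (List String)) line =>
        if PySem.List.pyGetD line 3 "" == "v" then (acc.1 ++ [line], acc.2)
        else (acc.1, acc.2 ++ [line])) (a, b)
    = (a ++ lines.filter pvVis, b ++ lines.filter (fun l => !pvVis l)) := by
  induction lines generalizing a b with
  | nil => simp
  | cons x xs ih =>
    simp only [List.foldl_cons, List.filter_cons]
    by_cases hx : pvVis x = true
    · rw [if_pos (by simpa [pvVis] using hx)]
      rw [ih]
      simp [hx]
    · have hx' : pvVis x = false := by simpa using hx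
      rw [if_neg (by simpa [pvVis] using hx)]
      rw [ih]
      simp [hx']

-- ===== VERDICT (by name: the statement is the Claim_ definition above) =====
theorem sort_by_visited_spec : Claim_equal_sort_by_visited := by
  intro lines _ _
  unfold Spec_sort_by_visited sort_by_visited sort_by_visited_alt
  rw [partition_foldl lines [] []]
  simp only [List.nil_append]
  exact (sorted2_eq_split lines).symm
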